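-- pv_equiv track=rewrite | github.com/kunal5042/AlgoExpert | 02 AlgoExpert Medium/50 River Sizes.py | riverSizes
-- ===== SOURCE A (Python) =====
-- def riverSizes(matrix):
--     (width, height) = (len(matrix[0]), len(matrix))
--     # to keep track of visited cells in the matrix
--     visited = [[False for x in range(width)] for y in range(height)]
--     result = []
--
--     # a hash map of co-ordinates of all the cells that are ones
--     ones_coordinates = {}
--     for x in range(height):
--         for y in range(width):
--             if matrix[x][y] == 1:
--                 # if a cell has value == 1, put it's co-ordinates in the map
--                 ones_coordinates[(x,y)] = (x,y)
--
--     for x in range(height):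
--         for y in range(width):
--             # if current cell has value 1 and it has not yet been visited
--             if matrix[x][y] == 1:
--                 if visited[x][y] is True:
--                     continue
--
--                 # mark it as visited
--                 visited[x][y] = True
--                 # river size = 1
--                 current_river_size = 1
--
--                 # get it's adjacents cells in all directions
--                 adjacents = []
--                 get_adjacents(adjacents, x, y, height, width)
--
--                 # as long as all the adjacent cells and their adjacent cells have not been checked
--                 while len(adjacents) > 0:
--                     # keep checking adjacent cell one at a time
--                     adj = adjacents.pop(0)
--                     # if the adjacent cell has value = 1
--                     if adj in ones_coordinates:
--                         current_adjacent = ones_coordinates[adj]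
--                         current_adjacent_x = current_adjacent[0]
--                         current_adjacent_y = current_adjacent[1]
--
--                         # and it has not yet been visited
--                         if visited[current_adjacent_x][current_adjacent_y] is False:
--                             # increment the current river size
--                             current_river_size += 1
--                             # mark it as visited
--                             visited[current_adjacent_x][current_adjacent_y] = True
--                             # add it's adjacents the queue
--                             get_adjacents(adjacents, current_adjacent_x, current_adjacent_y, height, width)
--
--                 # any river size >= 1 is valid, add it to the result
--                 if current_river_size >= 1:
--                     result.append(current_river_size)
--
--     return result
--
-- def get_adjacents(result, x, y, height, width):
--     if x - 1 >= 0: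
--         result.append((x-1,y))
--     if x + 1 < height:
--         result.append((x+1,y))
--     if y - 1 >= 0:
--         result.append((x, y-1))
--     if y + 1 < width:
--         result.append((x, y+1))
-- ===== SOURCE B (Python) =====
-- def riverSizes(matrix):
--     width, height = len(matrix[0]), len(matrix)
--     ones = [(x, y) for x in range(height) for y in range(width) if matrix[x][y] == 1]
--     ones_set = set(ones)
--     result = []
--     seen = set()
--     for cell in ones:
--         if cell in seen:
--             continue
--         comp = {cell}
--         frontier = {cell}
--         while frontier:
--             frontier = {n for (cx, cy) in frontier
--                         for n in ((cx - 1, cy), (cx + 1, cy), (cx, cy - 1), (cx, cy + 1))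
--                         if n in ones_set and n not in comp}
--             comp |= frontier
--         result.append(len(comp))
--         seen |= comp
--     return result
-- ===== Notes on version B (the rewrite author's own statement) =====
-- stated objective: alternative
-- what changed: Replaces A's FIFO queue with duplicate enqueues, 2D visited boolean matrix and coordinate-to-coordinate dict by a per-seed frontier/component pair of sets that is saturated level by level until the frontier is empty; sizes are set cardinalities instead of a visit counter.
import Mathlib
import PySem

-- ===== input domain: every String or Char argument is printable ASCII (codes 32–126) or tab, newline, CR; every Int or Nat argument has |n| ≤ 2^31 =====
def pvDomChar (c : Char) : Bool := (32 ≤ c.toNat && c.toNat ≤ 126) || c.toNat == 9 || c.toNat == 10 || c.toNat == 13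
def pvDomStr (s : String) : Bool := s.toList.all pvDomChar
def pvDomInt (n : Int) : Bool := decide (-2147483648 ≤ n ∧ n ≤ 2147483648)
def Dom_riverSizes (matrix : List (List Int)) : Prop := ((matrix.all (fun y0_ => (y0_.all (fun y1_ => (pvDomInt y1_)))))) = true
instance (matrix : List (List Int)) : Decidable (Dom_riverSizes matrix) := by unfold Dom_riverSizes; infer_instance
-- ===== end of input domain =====

-- B replaces A's FIFO queue + visited boolean matrix + coordinate dict by pure set
-- operations: per seed it grows a component set with a frontier set until the frontier
-- is empty (objective: alternative/simpler data flow; return value only, no mutation).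

-- shared helper: matrix[x][y] (total form; in range on every access the claim covers)
def pvCell (matrix : List (List Int)) (x y : Int) : Int :=
  PySem.List.pyGetD (PySem.List.pyGetD matrix x []) y 0

-- ===== PORT A =====

def getAdjacents (result : List (Int × Int)) (x y height width : Int) : List (Int × Int) :=
  let r1 := if x - 1 ≥ 0 then result ++ [(x - 1, y)] else result
  let r2 := if x + 1 < height then r1 ++ [(x + 1, y)] else r1
  let r3 := if y - 1 ≥ 0 then r2 ++ [(x, y - 1)] else r2
  if y + 1 < width then r3 ++ [(x, y + 1)] else r3

def pvOnesDict (matrix : List (List Int)) (height width : Int) :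
    PySem.Dict (Int × Int) (Int × Int) :=
  (PySem.List.pyRange 0 height 1).foldl (fun d x =>
    (PySem.List.pyRange 0 width 1).foldl (fun d y =>
      if pvCell matrix x y == 1 then d.insert (x, y) (x, y) else d) d) PySem.Dict.empty

-- visited[x][y] (read as an Option: none = Python IndexError) and visited[x][y] = True
def pvVisGet (v : List (List Bool)) (x y : Int) : Option Bool :=
  (PySem.List.pyGet? v x).bind (fun row => PySem.List.pyGet? row y)

def pvVisSet (v : List (List Bool)) (x y : Int) : List (List Bool) :=
  PySem.List.pySetD v x (PySem.List.pySetD (PySem.List.pyGetD v x []) y true)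

def pvFalseCount (v : List (List Bool)) : Nat := (v.map (fun r => r.count false)).sum

-- (termination helper for bfsLoop)
lemma pvSum_map_set {α : Type} (f : α → Nat) (v : List α) (k : Nat) (r' d : α)
    (hk : k < v.length) :
    ((v.set k r').map f).sum + f (v.getD k d) = (v.map f).sum + f r' := by
  induction v generalizing k with
  | nil => simp at hk
  | cons a tl ih =>
    cases k with
    | zero => simp [List.set]; omega
    | succ k =>
      simp only [List.set, List.map, List.sum_cons, List.getD_cons_succ]
      have := ih k (by simpa using hk)
      omega

lemma pvCount_set_true (row : List Bool) (j : Nat) (hj : j < row.length)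
    (hf : row.getD j true = false) :
    (row.set j true).count false + 1 = row.count false ∧
    (row.set j true).count true = row.count true + 1 := by
  induction row generalizing j with
  | nil => simp at hj
  | cons a tl ih =>
    cases j with
    | zero => simp_all [List.count_cons]
    | succ j =>
      have hj' : j < tl.length := by simpa using hj
      have := ih j hj' (by simpa using hf)
      simp only [List.set, List.count_cons]
      rcases this with ⟨h1, h2⟩
      constructor <;> split <;> omega

lemma pvVisGet_shape {v : List (List Bool)} {x y : Int} {b : Bool}
    (h : pvVisGet v x y = some b) :
    ∃ k j, PySem.List.pyIdx? v.length x = some k ∧ k < v.length ∧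
      PySem.List.pyIdx? (v.getD k []).length y = some j ∧ j < (v.getD k []).length ∧
      (v.getD k []).getD j true = b ∧
      pvVisSet v x y = v.set k ((v.getD k []).set j true) := by
  unfold pvVisGet PySem.List.pyGet? at h
  rcases hk : PySem.List.pyIdx? v.length x with _ | k
  · simp [hk] at h
  · simp only [hk, Option.bind_some] at h
    rcases hrow : v[k]? with _ | row
    · simp [hrow] at h
    · have hklen : k < v.length := by
        by_contra hh
        rw [List.getElem?_eq_none (by omega)] at hrow
        exact (by simpa using hrow)
      simp only [hrow, Option.bind_some] at h
      have hrw : v.getD k [] = row := by simp [List.getD, hrow]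
      rcases hj : PySem.List.pyIdx? row.length y with _ | j
      · simp [hj] at h
      · simp only [hj, Option.bind_some] at h
        have hjlen : j < row.length := by
          by_contra hh
          rw [List.getElem?_eq_none (by omega)] at h
          exact (by simpa using h)
        refine ⟨k, j, by simp [hk], hklen, ?_, ?_, ?_, ?_⟩
        · rw [hrw]; simp [hj]
        · rw [hrw]; exact hjlen
        · rw [hrw]
          rw [List.getElem?_eq_getElem hjlen] at h
          simp only [List.getD, List.getElem?_eq_getElem hjlen, Option.getD_some]
          exact Option.some.inj h
        · unfold pvVisSet PySem.List.pySetD PySem.List.pySet? PySem.List.pyGetD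
          unfold PySem.List.pyGet?
          simp [hk, hrow, hrw, hj]

lemma pvFalseCount_mark_lt {v : List (List Bool)} {x y : Int}
    (h : pvVisGet v x y = some false) :
    pvFalseCount (pvVisSet v x y) < pvFalseCount v := by
  obtain ⟨k, j, hk, hklen, hj, hjlen, hval, hset⟩ := pvVisGet_shape h
  rw [hset]
  unfold pvFalseCount
  have hs := pvSum_map_set (fun r => r.count false) v k ((v.getD k []).set j true) [] hklen
  have hc := pvCount_set_true (v.getD k []) j hjlen hval
  simp only at hs
  omega

def bfsLoop (ones : PySem.Dict (Int × Int) (Int × Int)) (height width : Int)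
    (visited : List (List Bool)) (adjacents : List (Int × Int)) (size : Int) :
    Int × List (List Bool) :=
  match adjacents with
  | [] => (size, visited)
  | adj :: rest =>
    match ones.get? adj with
    | none => bfsLoop ones height width visited rest size
    | some ca =>
      match hv : pvVisGet visited ca.1 ca.2 with
      | some false =>
          bfsLoop ones height width (pvVisSet visited ca.1 ca.2)
            (getAdjacents rest ca.1 ca.2 height width) (size + 1)
      | some true => bfsLoop ones height width visited rest size
      | none => bfsLoop ones height width visited rest size
          -- Python would raise IndexError here; unreachable: the dict's values are in-range coordinates
  termination_by (pvFalseCount visited, adjacents.length)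
  decreasing_by
  all_goals first
    | exact Prod.Lex.left _ _ (pvFalseCount_mark_lt hv)
    | exact Prod.Lex.right _ (by simp)

def riverSizes (matrix : List (List Int)) : List Int :=
  let width : Int := PySem.List.len (PySem.List.pyGetD matrix 0 [])
  let height : Int := PySem.List.len matrix
  let visited0 : List (List Bool) :=
    (PySem.List.pyRange 0 height 1).map (fun _ => (PySem.List.pyRange 0 width 1).map (fun _ => false))
  let onesDict := pvOnesDict matrix height width
  ((PySem.List.pyRange 0 height 1).foldl (fun st x =>
      (PySem.List.pyRange 0 width 1).foldl (fun st y =>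
        if pvCell matrix x y == 1 then
          if pvVisGet st.2 x y == some true then st
          else
            let visited1 := pvVisSet st.2 x y
            let adjacents := getAdjacents [] x y height width
            let out := bfsLoop onesDict height width visited1 adjacents 1
            (if out.1 ≥ 1 then st.1 ++ [out.1] else st.1, out.2)
        else st) st)
    (([], visited0) : List Int × List (List Bool))).1

-- ===== PORT B =====

def pvNbrs (c : Int × Int) : List (Int × Int) :=
  [(c.1 - 1, c.2), (c.1 + 1, c.2), (c.1, c.2 - 1), (c.1, c.2 + 1)]

-- (termination helper for growLoop)
lemma pvFilterLen_le {α : Type} (l : List α) (p q : α → Bool)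
    (himp : ∀ x ∈ l, q x = true → p x = true) :
    (l.filter q).length ≤ (l.filter p).length := by
  induction l with
  | nil => simp
  | cons a tl ih =>
    have ih' := ih (fun x hx => himp x (List.mem_cons_of_mem a hx))
    by_cases hq : q a
    · have hp := himp a List.mem_cons_self hq
      simp [List.filter_cons, hq, hp]; omega
    · simp only [List.filter_cons, Bool.not_eq_true] at *
      rw [if_neg (by simp [hq])]
      split <;> simp <;> omega
lemma pvFilterLen_lt {α : Type} (l : List α) (p q : α → Bool)
    (himp : ∀ x ∈ l, q x = true → p x = true) (n : α) (hn : n ∈ l)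
    (hp : p n = true) (hq : q n = false) :
    (l.filter q).length < (l.filter p).length := by
  induction l with
  | nil => simp at hn
  | cons a tl ih =>
    have himp' : ∀ x ∈ tl, q x = true → p x = true :=
      fun x hx => himp x (List.mem_cons_of_mem a hx)
    have hle := pvFilterLen_le tl p q himp'
    rcases List.mem_cons.1 hn with hn | hn
    · subst hn
      simp [List.filter_cons, hp, hq]; omega
    · have hlt := ih himp' hn
      by_cases hqa : q a
      · have hpa := himp a List.mem_cons_self hqa
        simp [List.filter_cons, hqa, hpa]; omega
      · simp only [List.filter_cons, Bool.not_eq_true] at *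
        rw [if_neg (by simp [hqa])]
        split <;> simp <;> omega

def growLoop (onesSet : PySem.Set (Int × Int)) (comp frontier : PySem.Set (Int × Int)) :
    PySem.Set (Int × Int) :=
  if frontier = [] then comp
  else
    let f' : PySem.Set (Int × Int) :=
      PySem.Set.ofList ((frontier.flatMap pvNbrs).filter
        (fun n => PySem.Set.contains onesSet n && !PySem.Set.contains comp n))
    growLoop onesSet (PySem.Set.union comp f') f'
  termination_by ((onesSet.filter (fun c => !PySem.Set.contains comp c)).length, frontier.length)
  decreasing_by
    rename_i hfr
    have hAtt : (List.attach frontier).flatMap (fun x => pvNbrs x.1) = frontier.flatMap pvNbrs := by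
      simp [List.flatMap]
    simp only [hAtt] at *
    by_cases hf : (PySem.Set.ofList ((frontier.flatMap pvNbrs).filter
        (fun n => PySem.Set.contains onesSet n && !PySem.Set.contains comp n))) = ([] : List (Int × Int))
    · rw [hf]
      have : PySem.Set.union comp ([] : List (Int × Int)) = comp := rfl
      rw [this]
      exact Prod.Lex.right _ (by cases frontier <;> simp_all)
    · apply Prod.Lex.left
      obtain ⟨n, hn⟩ := List.exists_mem_of_ne_nil _ hf
      have hn' := (PySem.Set.mem_ofList _ _).1 hn
      rw [List.mem_filter] at hn'
      obtain ⟨hmemfm, hcond⟩ := hn'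
      rw [Bool.and_eq_true, Bool.not_eq_true'] at hcond
      obtain ⟨hones, hncomp⟩ := hcond
      apply pvFilterLen_lt (n := n)
      · intro x hx hqx
        have hxu : x ∉ PySem.Set.union comp (PySem.Set.ofList ((frontier.flatMap pvNbrs).filter
            (fun n => PySem.Set.contains onesSet n && !PySem.Set.contains comp n))) := by
          intro hmem
          rw [(PySem.Set.contains_iff _ _).2 hmem] at hqx
          simp at hqx
        have hxc : x ∉ comp := fun hc => hxu ((PySem.Set.mem_union _ _ _).2 (Or.inl hc))
        have : PySem.Set.contains comp x = false := by
          by_contra hcc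
          rw [Bool.not_eq_false] at hcc
          exact hxc ((PySem.Set.contains_iff _ _).1 hcc)
        simp [this]
        exact hxc
      · exact (PySem.Set.contains_iff _ _).1 hones
      · have hnc : n ∉ comp := fun hc => by
          rw [(PySem.Set.contains_iff _ _).2 hc] at hncomp; exact Bool.noConfusion hncomp
        simp [hnc]
      · have hnc : n ∉ comp := fun hc => by
          rw [(PySem.Set.contains_iff _ _).2 hc] at hncomp; exact Bool.noConfusion hncomp
        obtain ⟨ab, hab, hnn⟩ := List.mem_flatMap.1 hmemfm
        have hmu : PySem.Set.contains (PySem.Set.union comp (PySem.Set.ofList ((frontier.flatMap pvNbrs).filter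
            (fun n => PySem.Set.contains onesSet n && !PySem.Set.contains comp n)))) n = true :=
          (PySem.Set.contains_iff _ _).2 ((PySem.Set.mem_union _ _ _).2 (Or.inr hn))
        simp
        exact Or.inr ⟨⟨ab.1, ab.2, (by simpa using hab), (by simpa using hnn)⟩,
          ((PySem.Set.contains_iff _ _).1 hones), hnc⟩

def riverSizes_alt (matrix : List (List Int)) : List Int :=
  let width : Int := PySem.List.len (PySem.List.pyGetD matrix 0 [])
  let height : Int := PySem.List.len matrix
  let ones : List (Int × Int) :=
    (PySem.List.pyRange 0 height 1).flatMap (fun x =>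
      ((PySem.List.pyRange 0 width 1).filter (fun y => pvCell matrix x y == 1)).map (fun y => (x, y)))
  let onesSet : PySem.Set (Int × Int) := PySem.Set.ofList ones
  (ones.foldl (fun st cell =>
      if PySem.Set.contains st.2 cell then st
      else
        let comp := growLoop onesSet (PySem.Set.ofList [cell]) (PySem.Set.ofList [cell])
        (st.1 ++ [PySem.Set.len comp], PySem.Set.union st.2 comp))
    (([], PySem.Set.empty) : List Int × PySem.Set (Int × Int))).1

-- ===== PRECONDITION & SPEC =====
-- Pre_ excludes exactly the inputs on which the Python A raises IndexError:
-- the empty matrix (matrix[0]) and matrices with a row shorter than row 0.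
def Pre_riverSizes (matrix : List (List Int)) : Prop :=
  matrix ≠ [] ∧ ∀ row ∈ matrix, (matrix.headD []).length ≤ row.length
instance (matrix : List (List Int)) : Decidable (Pre_riverSizes matrix) := by
  unfold Pre_riverSizes; infer_instance

def pvWitness_riverSizes : List (List Int) := [[1, 0], [1, 1]]

def Spec_riverSizes (matrix : List (List Int)) (out : List Int) : Prop := out = riverSizes_alt matrix
instance (matrix : List (List Int)) (out : List Int) : Decidable (Spec_riverSizes matrix out) := by unfold Spec_riverSizes; infer_instance

-- ===== CLAIM (what is proved, stated in full; the proofs are below) =====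
def Claim_equal_riverSizes : Prop := ∀ (matrix : List (List Int)), Dom_riverSizes matrix → Pre_riverSizes matrix → Spec_riverSizes matrix (riverSizes matrix)

-- ===== LEMMAS AND PROOFS =====

-- Abstractions: height, width, the row-major list of 1-cells, the grid graph.
def pvH (matrix : List (List Int)) : Int := PySem.List.len matrix
def pvW (matrix : List (List Int)) : Int := PySem.List.len (PySem.List.pyGetD matrix 0 [])

def pvGrid (matrix : List (List Int)) : List (Int × Int) :=
  (PySem.List.pyRange 0 (pvH matrix) 1).flatMap (fun x =>
    (PySem.List.pyRange 0 (pvW matrix) 1).map (fun y => (x, y)))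

def pvOnesL (matrix : List (List Int)) : List (Int × Int) :=
  (PySem.List.pyRange 0 (pvH matrix) 1).flatMap (fun x =>
    ((PySem.List.pyRange 0 (pvW matrix) 1).filter (fun y => pvCell matrix x y == 1)).map (fun y => (x, y)))

abbrev pvCanon (matrix : List (List Int)) (p : Int × Int) : Prop :=
  0 ≤ p.1 ∧ p.1 < pvH matrix ∧ 0 ≤ p.2 ∧ p.2 < pvW matrix

-- one step of the 1-cell adjacency graph, avoiding `avoid`
def pvStep (matrix : List (List Int)) (avoid : Int × Int → Prop) (a b : Int × Int) : Prop :=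
  b ∈ pvOnesL matrix ∧ ¬ avoid b ∧ b ∈ pvNbrs a

def pvReach (matrix : List (List Int)) (avoid : Int × Int → Prop) (s p : Int × Int) : Prop :=
  Relation.ReflTransGen (pvStep matrix avoid) s p

def pvVisT (v : List (List Bool)) (p : Int × Int) : Prop := pvVisGet v p.1 p.2 = some true

def pvDims (matrix : List (List Int)) (v : List (List Bool)) : Prop :=
  v.length = (pvH matrix).toNat ∧ ∀ r ∈ v, r.length = (pvW matrix).toNat

def pvNbrsIn (matrix : List (List Int)) (p : Int × Int) : List (Int × Int) :=
  (pvNbrs p).filter (fun n => decide (pvCanon matrix n))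

def pvReachQ (matrix : List (List Int)) (v : List (List Bool)) (q : List (Int × Int))
    (p : Int × Int) : Prop :=
  ∃ s ∈ q, s ∈ pvOnesL matrix ∧ ¬ pvVisT v s ∧ pvReach matrix (pvVisT v) s p

def pvTrueCount (v : List (List Bool)) : Nat := (v.map (fun r => r.count true)).sum

-- ---- basic facts about the grid and the 1-cells ----

lemma pvGrid_mem (matrix : List (List Int)) (p : Int × Int) :
    p ∈ pvGrid matrix ↔ pvCanon matrix p := by
  simp only [pvGrid, List.mem_flatMap, List.mem_map, PySem.List.mem_pyRange_one, pvCanon]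
  constructor
  · rintro ⟨x, hx, y, hy, rfl⟩
    exact ⟨hx.1, hx.2, hy.1, hy.2⟩
  · rintro ⟨h1, h2, h3, h4⟩
    exact ⟨p.1, ⟨h1, h2⟩, p.2, ⟨h3, h4⟩, rfl⟩

lemma pvGrid_nodup (matrix : List (List Int)) : (pvGrid matrix).Nodup := by
  have h : pvGrid matrix =
      (PySem.List.pyRange 0 (pvH matrix) 1) ×ˢ (PySem.List.pyRange 0 (pvW matrix) 1) := rfl
  rw [h]
  exact (PySem.List.nodup_pyRange_one _ _).product (PySem.List.nodup_pyRange_one _ _)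

lemma pvOnesL_eq (matrix : List (List Int)) :
    pvOnesL matrix = (pvGrid matrix).filter (fun p => pvCell matrix p.1 p.2 == 1) := by
  unfold pvOnesL pvGrid
  rw [List.filter_flatMap]
  congr 1
  funext x
  rw [List.filter_map]
  rfl

lemma pvOnesL_mem (matrix : List (List Int)) (p : Int × Int) :
    p ∈ pvOnesL matrix ↔ pvCanon matrix p ∧ pvCell matrix p.1 p.2 = 1 := by
  rw [pvOnesL_eq, List.mem_filter, pvGrid_mem]
  simp

lemma pvOnesL_nodup (matrix : List (List Int)) : (pvOnesL matrix).Nodup := by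
  rw [pvOnesL_eq]
  exact (pvGrid_nodup matrix).filter _

lemma pvNbrs_symm (a b : Int × Int) : a ∈ pvNbrs b ↔ b ∈ pvNbrs a := by
  simp only [pvNbrs, List.mem_cons, List.not_mem_nil, or_false, Prod.ext_iff]
  omega

lemma pvNbrsIn_mem (matrix : List (List Int)) (p n : Int × Int) :
    n ∈ pvNbrsIn matrix p ↔ n ∈ pvNbrs p ∧ pvCanon matrix n := by
  simp [pvNbrsIn, List.mem_filter]

set_option maxHeartbeats 2000000 in
lemma getAdjacents_eq (matrix : List (List Int)) (res : List (Int × Int)) (x y : Int)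
    (h : pvCanon matrix (x, y)) :
    getAdjacents res x y (pvH matrix) (pvW matrix) = res ++ pvNbrsIn matrix (x, y) := by
  obtain ⟨h1, h2, h3, h4⟩ := h
  have d1 : pvCanon matrix (x - 1, y) ↔ x - 1 ≥ 0 := by unfold pvCanon; simp; omega
  have d2 : pvCanon matrix (x + 1, y) ↔ x + 1 < pvH matrix := by unfold pvCanon; simp; omega
  have d3 : pvCanon matrix (x, y - 1) ↔ y - 1 ≥ 0 := by unfold pvCanon; simp; omega
  have d4 : pvCanon matrix (x, y + 1) ↔ y + 1 < pvW matrix := by unfold pvCanon; simp; omega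
  by_cases c1 : x - 1 ≥ 0 <;> by_cases c2 : x + 1 < pvH matrix <;>
    by_cases c3 : y - 1 ≥ 0 <;> by_cases c4 : y + 1 < pvW matrix <;>
    simp [getAdjacents, pvNbrsIn, pvNbrs, List.filter_cons, d1, d2, d3, d4, c1, c2, c3, c4] <;>
    split_ifs <;> simp_all <;> omega

lemma pvOnesDict_get? (matrix : List (List Int)) (p q : Int × Int) :
    (pvOnesDict matrix (pvH matrix) (pvW matrix)).get? p = some q ↔
      p ∈ pvOnesL matrix ∧ q = p := by
  have hfold : pvOnesDict matrix (pvH matrix) (pvW matrix) =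
      (pvOnesL matrix).foldl (fun d r => d.insert r r) PySem.Dict.empty := by
    unfold pvOnesDict pvOnesL
    rw [List.foldl_flatMap]
    apply PySem.List.foldl_congr_mem
    intro d x _
    rw [List.foldl_map, PySem.List.foldl_if_eq_foldl_filter]
  rw [hfold]
  have hnodup : ((pvOnesL matrix).map (fun r => r)).Nodup := by
    simpa using pvOnesL_nodup matrix
  have hkeys : ((pvOnesL matrix).foldl (fun d r => d.insert r r) PySem.Dict.empty).keys.Nodup :=
    PySem.Dict.nodup_keys_foldl_insert _ _ _ (by simp [PySem.Dict.keys_empty])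
  have hitems := PySem.Dict.items_foldl_insert_fresh (l := pvOnesL matrix)
    (k := fun r => r) (v := fun r => r) (d := PySem.Dict.empty)
    (by intro a _; simp [PySem.Dict.contains_empty]) hnodup
  rw [PySem.Dict.get?_eq_some_iff_mem_items _ _ _ hkeys, hitems]
  have hemp : (PySem.Dict.empty : PySem.Dict (Int × Int) (Int × Int)).items = [] := rfl
  rw [hemp, List.nil_append]
  constructor
  · intro hmem
    obtain ⟨r, hr, he⟩ := List.mem_map.1 hmem
    rw [Prod.mk.injEq] at he
    exact ⟨he.1 ▸ hr, by rw [← he.2, he.1]⟩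
  · rintro ⟨hp, rfl⟩
    exact List.mem_map.2 ⟨_, hp, rfl⟩

-- ---- visited-matrix lemmas ----

lemma pvVisGet_canon (matrix : List (List Int)) (v : List (List Bool)) (x y : Int)
    (hd : pvDims matrix v) (hc : pvCanon matrix (x, y)) :
    pvVisGet v x y = some ((v.getD x.toNat []).getD y.toNat false) := by
  obtain ⟨hlen, hrows⟩ := hd
  obtain ⟨h1, h2, h3, h4⟩ := hc
  have hx : x.toNat < v.length := by
    rw [hlen]; omega
  have hrow : v.getD x.toNat [] = v[x.toNat] := List.getD_eq_getElem v [] hx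
  have hy : y.toNat < (v[x.toNat]).length := by
    rw [hrows _ (List.getElem_mem hx)]; omega
  unfold pvVisGet
  rw [PySem.List.pyGet?_of_nonneg _ h1, List.getElem?_eq_getElem hx]
  simp only [Option.bind_some]
  rw [PySem.List.pyGet?_of_nonneg _ h3, List.getElem?_eq_getElem hy]
  rw [hrow, List.getD_eq_getElem _ false hy]

lemma pvDims_visSet (matrix : List (List Int)) (v : List (List Bool)) (x y : Int)
    (hd : pvDims matrix v) : pvDims matrix (pvVisSet v x y) := by
  obtain ⟨hlen, hrows⟩ := hd
  have hshape : ∀ {α : Type} (xs : List α) (i : Int) (a : α), ∀ r ∈ PySem.List.pySetD xs i a,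
      r ∈ xs ∨ (r = a ∧ PySem.Raise.InRange xs.length i) := by
    intro α xs i a r hr
    unfold PySem.List.pySetD PySem.List.pySet? at hr
    rcases hk : PySem.List.pyIdx? xs.length i with _ | k
    · rw [hk] at hr
      exact Or.inl (by simpa using hr)
    · rw [hk] at hr
      simp only [Option.map_some, Option.getD_some] at hr
      rcases List.mem_or_eq_of_mem_set hr with hmem | rfl
      · exact Or.inl hmem
      · refine Or.inr ⟨rfl, ?_⟩
        unfold PySem.Raise.InRange
        unfold PySem.List.pyIdx? at hk
        split_ifs at hk <;> simp_all <;> omega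
  constructor
  · rw [pvVisSet, PySem.List.length_pySetD]
    exact hlen
  · intro r hr
    rcases hshape _ _ _ r hr with hmem | ⟨rfl, hir⟩
    · exact hrows _ hmem
    · rw [PySem.List.length_pySetD]
      exact hrows _ (PySem.List.pyGetD_mem v [] hir)

lemma pvVisT_visSet (matrix : List (List Int)) (v : List (List Bool)) (q p : Int × Int)
    (hd : pvDims matrix v) (hq : pvCanon matrix q) (hp : pvCanon matrix p) :
    (pvVisT (pvVisSet v q.1 q.2) p ↔ pvVisT v p ∨ p = q) := by
  have hd' := pvDims_visSet matrix v q.1 q.2 hd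
  obtain ⟨hq1, hq2, hq3, hq4⟩ := hq
  obtain ⟨hp1, hp2, hp3, hp4⟩ := hp
  have hgen : pvVisSet v q.1 q.2 = v.set q.1.toNat ((v.getD q.1.toNat []).set q.2.toNat true) := by
    unfold pvVisSet
    rw [PySem.List.pySetD_of_nonneg _ _ hq1, PySem.List.pySetD_of_nonneg _ _ hq3]
    congr 2
    unfold PySem.List.pyGetD
    rw [PySem.List.pyGet?_of_nonneg _ hq1]
    exact (List.getD_eq_getElem?_getD ..).symm
  unfold pvVisT
  rw [pvVisGet_canon matrix _ p.1 p.2 hd' ⟨hp1, hp2, hp3, hp4⟩,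
    pvVisGet_canon matrix v p.1 p.2 hd ⟨hp1, hp2, hp3, hp4⟩, hgen]
  simp only [Option.some.injEq]
  obtain ⟨hlen, hrows⟩ := hd
  have ha : q.1.toNat < v.length := by rw [hlen]; omega
  have hpq : (p = q) ↔ (p.1.toNat = q.1.toNat ∧ p.2.toNat = q.2.toNat) := by
    rw [Prod.ext_iff]; omega
  by_cases h1 : p.1.toNat = q.1.toNat
  · have hrw1 : (v.set q.1.toNat ((v.getD q.1.toNat []).set q.2.toNat true)).getD p.1.toNat [] =
        ((v.getD q.1.toNat []).set q.2.toNat true) := by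
      rw [h1, List.getD_eq_getElem _ _ (by rw [List.length_set]; exact ha)]
      simp [List.getElem_set_self]
    rw [hrw1]
    by_cases h2 : p.2.toNat = q.2.toNat
    · have hjlt : q.2.toNat < (v.getD q.1.toNat []).length := by
        rw [List.getD_eq_getElem _ _ ha, hrows _ (List.getElem_mem ha)]; omega
      rw [h2, List.getD_eq_getElem _ _ (by rw [List.length_set]; exact hjlt)]
      rw [List.getElem_set_self]
      constructor
      · intro _; exact Or.inr (hpq.2 ⟨h1, h2⟩)
      · intro _; rfl
    · have hrw2 : ((v.getD q.1.toNat []).set q.2.toNat true).getD p.2.toNat false =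
          (v.getD q.1.toNat []).getD p.2.toNat false := by
        rw [List.getD_eq_getElem?_getD, List.getD_eq_getElem?_getD,
          List.getElem?_set_ne (by omega)]
        rw [List.getD_eq_getElem?_getD]
      rw [hrw2, h1]
      constructor
      · exact Or.inl
      · rintro (hh | hh)
        · exact hh
        · exact absurd (hpq.1 hh).2 h2
  · have hrw1 : (v.set q.1.toNat ((v.getD q.1.toNat []).set q.2.toNat true)).getD p.1.toNat [] =
        v.getD p.1.toNat [] := by
      rw [List.getD_eq_getElem?_getD, List.getD_eq_getElem?_getD,
        List.getElem?_set_ne (by omega)]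
      rw [List.getD_eq_getElem?_getD]
    rw [hrw1]
    constructor
    · exact Or.inl
    · rintro (hh | hh)
      · exact hh
      · exact absurd (hpq.1 hh).1 h1

lemma pvTrueCount_visSet (v : List (List Bool)) (x y : Int)
    (h : pvVisGet v x y = some false) :
    pvTrueCount (pvVisSet v x y) = pvTrueCount v + 1 := by
  obtain ⟨k, j, hk, hklen, hj, hjlen, hval, hset⟩ := pvVisGet_shape h
  rw [hset]
  unfold pvTrueCount
  have hs := pvSum_map_set (fun r => r.count true) v k ((v.getD k []).set j true) [] hklen
  have hc := pvCount_set_true (v.getD k []) j hjlen hval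
  simp only at hs
  omega

lemma pvVisGet_false (matrix : List (List Int)) (v : List (List Bool)) (p : Int × Int)
    (hd : pvDims matrix v) (hc : pvCanon matrix p) (h : ¬ pvVisT v p) :
    pvVisGet v p.1 p.2 = some false := by
  have := pvVisGet_canon matrix v p.1 p.2 hd (by simpa using hc)
  unfold pvVisT at h
  rw [this] at h ⊢
  rcases hb : (v.getD p.1.toNat []).getD p.2.toNat false with _ | _
  · rfl
  · rw [hb] at h; exact absurd rfl h

-- ---- reachability helpers ----

lemma pvLastExit {α : Type} (r : α → α → Prop) (P : α → Prop) {s p : α}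
    (h : Relation.ReflTransGen r s p) (hp : ¬ P p) :
    Relation.ReflTransGen (fun a b => r a b ∧ ¬ P b) s p ∨
      ∃ t, P t ∧ Relation.ReflTransGen r s t ∧
        Relation.ReflTransGen (fun a b => r a b ∧ ¬ P b) t p := by
  induction h with
  | refl => exact Or.inl Relation.ReflTransGen.refl
  | @tail b c hsb hbc ih =>
    by_cases hPb : P b
    · exact Or.inr ⟨b, hPb, hsb, Relation.ReflTransGen.single ⟨hbc, hp⟩⟩
    · rcases ih hPb with h' | ⟨t, hPt, hst, htb⟩
      · exact Or.inl (h'.tail ⟨hbc, hp⟩)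
      · exact Or.inr ⟨t, hPt, hst, htb.tail ⟨hbc, hp⟩⟩

lemma pvReach_mono (matrix : List (List Int)) (av av' : Int × Int → Prop)
    (h : ∀ z, av z → av' z) {s p : Int × Int} (hr : pvReach matrix av' s p) :
    pvReach matrix av s p :=
  Relation.ReflTransGen.mono (fun _ b hb => ⟨hb.1, fun hav => hb.2.1 (h b hav), hb.2.2⟩) hr

lemma pvReach_target (matrix : List (List Int)) (av : Int × Int → Prop) {s p : Int × Int}
    (h : pvReach matrix av s p) : p = s ∨ (p ∈ pvOnesL matrix ∧ ¬ av p) := by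
  rcases Relation.ReflTransGen.cases_tail h with h' | ⟨c, _, hcp⟩
  · exact Or.inl h'
  · exact Or.inr ⟨hcp.1, hcp.2.1⟩

-- visited set closed under adjacency pulls a reachable visited cell back to the seed
lemma pvReach_back (matrix : List (List Int)) (V : Int × Int → Prop)
    (hcl : ∀ a b, a ∈ pvOnesL matrix → V a → b ∈ pvOnesL matrix → b ∈ pvNbrs a → V b)
    {s p : Int × Int} (hs : s ∈ pvOnesL matrix)
    (h : pvReach matrix (fun _ => False) s p) (hp : V p) : V s := by
  induction h with
  | refl => exact hp
  | @tail b c hsb hbc ih =>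
    apply ih
    have hbones : b ∈ pvOnesL matrix := by
      rcases pvReach_target matrix _ hsb with rfl | hb
      · exact hs
      · exact hb.1
    exact hcl c b hbc.1 hp hbones ((pvNbrs_symm b c).2 hbc.2.2)

-- ---- the BFS while loop of A ----

-- unfolding equations for bfsLoop
lemma bfsLoop_nil (d : PySem.Dict (Int × Int) (Int × Int)) (h w : Int)
    (v : List (List Bool)) (c : Int) : bfsLoop d h w v [] c = (c, v) := by
  rw [bfsLoop]

lemma bfsLoop_notin (d : PySem.Dict (Int × Int) (Int × Int)) (h w : Int)
    (v : List (List Bool)) (adj : Int × Int) (rest : List (Int × Int)) (c : Int)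
    (hget : d.get? adj = none) :
    bfsLoop d h w v (adj :: rest) c = bfsLoop d h w v rest c := by
  rw [bfsLoop]; simp only [hget]

lemma bfsLoop_skipT (d : PySem.Dict (Int × Int) (Int × Int)) (h w : Int)
    (v : List (List Bool)) (adj ca : Int × Int) (rest : List (Int × Int)) (c : Int)
    (hget : d.get? adj = some ca) (hv : pvVisGet v ca.1 ca.2 = some true) :
    bfsLoop d h w v (adj :: rest) c = bfsLoop d h w v rest c := by
  rw [bfsLoop]
  simp only [hget]
  split <;> rename_i heq <;> rw [hv] at heq <;> first | rfl | (cases heq)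

lemma bfsLoop_skipN (d : PySem.Dict (Int × Int) (Int × Int)) (h w : Int)
    (v : List (List Bool)) (adj ca : Int × Int) (rest : List (Int × Int)) (c : Int)
    (hget : d.get? adj = some ca) (hv : pvVisGet v ca.1 ca.2 = none) :
    bfsLoop d h w v (adj :: rest) c = bfsLoop d h w v rest c := by
  rw [bfsLoop]
  simp only [hget]
  split <;> rename_i heq <;> rw [hv] at heq <;> first | rfl | (cases heq)

lemma bfsLoop_visit (d : PySem.Dict (Int × Int) (Int × Int)) (h w : Int)
    (v : List (List Bool)) (adj ca : Int × Int) (rest : List (Int × Int)) (c : Int)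
    (hget : d.get? adj = some ca) (hv : pvVisGet v ca.1 ca.2 = some false) :
    bfsLoop d h w v (adj :: rest) c =
      bfsLoop d h w (pvVisSet v ca.1 ca.2) (getAdjacents rest ca.1 ca.2 h w) (c + 1) := by
  rw [bfsLoop]
  simp only [hget]
  split <;> rename_i heq <;> rw [hv] at heq <;> first | rfl | (cases heq)

lemma bfsLoop_size (d : PySem.Dict (Int × Int) (Int × Int)) (h w : Int)
    (v : List (List Bool)) (q : List (Int × Int)) (c : Int) :
    ∃ k : Nat, (bfsLoop d h w v q c).1 = c + k ∧
      pvTrueCount (bfsLoop d h w v q c).2 = pvTrueCount v + k := by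
  induction v, q, c using bfsLoop.induct (ones := d) (height := h) (width := w) with
  | case1 v c => exact ⟨0, by simp [bfsLoop_nil]⟩
  | case2 v c adj rest hget ih =>
    rw [bfsLoop_notin d h w v adj rest c hget]
    exact ih
  | case3 v c adj rest ca hget hv ih =>
    obtain ⟨k, h1, h2⟩ := ih
    rw [bfsLoop_visit d h w v adj ca rest c hget hv]
    refine ⟨k + 1, ?_, ?_⟩
    · rw [h1]; push_cast; ring
    · rw [h2, pvTrueCount_visSet _ _ _ hv]; omega
  | case4 v c adj rest ca hget hv ih =>
    rw [bfsLoop_skipT d h w v adj ca rest c hget hv]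
    exact ih
  | case5 v c adj rest ca hget hv ih =>
    rw [bfsLoop_skipN d h w v adj ca rest c hget hv]
    exact ih

lemma pvStep_visSet_iff (matrix : List (List Int)) (v : List (List Bool)) (adj : Int × Int)
    (hadj : adj ∈ pvOnesL matrix) (hd : pvDims matrix v) (a b : Int × Int) :
    pvStep matrix (pvVisT (pvVisSet v adj.1 adj.2)) a b ↔
      (pvStep matrix (pvVisT v) a b ∧ b ≠ adj) := by
  have hcadj : pvCanon matrix adj := ((pvOnesL_mem matrix adj).1 hadj).1
  constructor
  · rintro ⟨hb, hnb, hnbr⟩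
    have hcb : pvCanon matrix b := ((pvOnesL_mem matrix b).1 hb).1
    rw [pvVisT_visSet matrix v adj b hd hcadj hcb] at hnb
    push_neg at hnb
    exact ⟨⟨hb, hnb.1, hnbr⟩, hnb.2⟩
  · rintro ⟨⟨hb, hnb, hnbr⟩, hne⟩
    have hcb : pvCanon matrix b := ((pvOnesL_mem matrix b).1 hb).1
    refine ⟨hb, ?_, hnbr⟩
    rw [pvVisT_visSet matrix v adj b hd hcadj hcb]
    rintro (hh | hh)
    · exact hnb hh
    · exact hne hh

lemma pvBfsStep_iff (matrix : List (List Int)) (v : List (List Bool)) (adj : Int × Int)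
    (rest : List (Int × Int)) (hadj : adj ∈ pvOnesL matrix) (hnv : ¬ pvVisT v adj)
    (hd : pvDims matrix v) (p : Int × Int) :
    ((pvVisT v p ∨ p = adj) ∨
        pvReachQ matrix (pvVisSet v adj.1 adj.2) (rest ++ pvNbrsIn matrix adj) p) ↔
      (pvVisT v p ∨ pvReachQ matrix v (adj :: rest) p) := by
  have hcadj : pvCanon matrix adj := ((pvOnesL_mem matrix adj).1 hadj).1
  have hvT : ∀ z, z ∈ pvOnesL matrix →
      (pvVisT (pvVisSet v adj.1 adj.2) z ↔ pvVisT v z ∨ z = adj) := fun z hz =>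
    pvVisT_visSet matrix v adj z hd hcadj ((pvOnesL_mem matrix z).1 hz).1
  have hconv : ∀ {s t : Int × Int},
      pvReach matrix (pvVisT (pvVisSet v adj.1 adj.2)) s t →
      Relation.ReflTransGen (fun a b => pvStep matrix (pvVisT v) a b ∧ b ≠ adj) s t :=
    fun h => Relation.ReflTransGen.mono
      (fun a b hb => (pvStep_visSet_iff matrix v adj hadj hd a b).1 hb) h
  have hconv' : ∀ {s t : Int × Int},
      Relation.ReflTransGen (fun a b => pvStep matrix (pvVisT v) a b ∧ b ≠ adj) s t →
      pvReach matrix (pvVisT (pvVisSet v adj.1 adj.2)) s t :=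
    fun h => Relation.ReflTransGen.mono
      (fun a b hb => (pvStep_visSet_iff matrix v adj hadj hd a b).2 hb) h
  -- a path from adj itself, avoiding adj on the way, lands in the new frontier
  have hFromAdj : ∀ {p : Int × Int},
      Relation.ReflTransGen (fun a b => pvStep matrix (pvVisT v) a b ∧ b ≠ adj) adj p →
      p = adj ∨ pvReachQ matrix (pvVisSet v adj.1 adj.2) (rest ++ pvNbrsIn matrix adj) p := by
    intro p hpath
    rcases Relation.ReflTransGen.cases_head hpath with rfl | ⟨n, hn, hnp⟩
    · exact Or.inl rfl
    · obtain ⟨⟨hnones, hnnv, hnnbr⟩, hnne⟩ := hn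
      refine Or.inr ⟨n, List.mem_append_right _ ((pvNbrsIn_mem matrix adj n).2
        ⟨hnnbr, ((pvOnesL_mem matrix n).1 hnones).1⟩), hnones, ?_, hconv' hnp⟩
      rw [hvT n hnones]
      rintro (hh | hh)
      · exact hnnv hh
      · exact hnne hh
  constructor
  · rintro ((hvis | rfl) | ⟨s, hsmem, hsones, hsnv, hpath⟩)
    · exact Or.inl hvis
    · exact Or.inr ⟨p, List.mem_cons_self, hadj, hnv, Relation.ReflTransGen.refl⟩
    · have hsnv' : ¬ pvVisT v s := fun hh => hsnv ((hvT s hsones).2 (Or.inl hh))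
      have hpath' : pvReach matrix (pvVisT v) s p :=
        Relation.ReflTransGen.mono (fun a b hb =>
          ((pvStep_visSet_iff matrix v adj hadj hd a b).1 hb).1) hpath
      rcases List.mem_append.1 hsmem with hsr | hsn
      · exact Or.inr ⟨s, List.mem_cons_of_mem _ hsr, hsones, hsnv', hpath'⟩
      · obtain ⟨hsnbr, _⟩ := (pvNbrsIn_mem matrix adj s).1 hsn
        refine Or.inr ⟨adj, List.mem_cons_self, hadj, hnv, ?_⟩
        exact Relation.ReflTransGen.head ⟨hsones, hsnv', hsnbr⟩ hpath'
  · rintro (hvis | ⟨s, hsmem, hsones, hsnv, hpath⟩)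
    · exact Or.inl (Or.inl hvis)
    · by_cases hpadj : p = adj
      · exact Or.inl (Or.inr hpadj)
      · rcases pvLastExit _ (fun z => z = adj) hpath hpadj with hpath' | ⟨t, rfl, _, htp⟩
        · rcases List.mem_cons.1 hsmem with rfl | hsr
          · rcases hFromAdj hpath' with rfl | hh
            · exact absurd rfl hpadj
            · exact Or.inr hh
          · by_cases hsadj : s = adj
            · subst hsadj
              rcases hFromAdj hpath' with rfl | hh
              · exact absurd rfl hpadj
              · exact Or.inr hh
            · refine Or.inr ⟨s, List.mem_append_left _ hsr, hsones, ?_, hconv' hpath'⟩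
              rw [hvT s hsones]
              rintro (hh | hh)
              · exact hsnv hh
              · exact hsadj hh
        · rcases hFromAdj htp with rfl | hh
          · exact absurd rfl hpadj
          · exact Or.inr hh

lemma bfsLoop_main (matrix : List (List Int))
    (v : List (List Bool)) (q : List (Int × Int)) (c : Int)
    (hd : pvDims matrix v) (hq : ∀ p ∈ q, pvCanon matrix p) :
    pvDims matrix (bfsLoop (pvOnesDict matrix (pvH matrix) (pvW matrix)) (pvH matrix) (pvW matrix) v q c).2 ∧
    ∀ p, pvCanon matrix p →
      (pvVisT (bfsLoop (pvOnesDict matrix (pvH matrix) (pvW matrix)) (pvH matrix) (pvW matrix) v q c).2 p ↔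
        pvVisT v p ∨ pvReachQ matrix v q p) := by
  revert hd hq
  induction v, q, c using bfsLoop.induct (ones := pvOnesDict matrix (pvH matrix) (pvW matrix))
      (height := pvH matrix) (width := pvW matrix) with
  | case1 v c =>
    intro hd _
    rw [bfsLoop_nil]
    refine ⟨hd, fun p _ => ?_⟩
    simp [pvReachQ]
  | case2 v c adj rest hget ih =>
    intro hd hq
    have hnot : adj ∉ pvOnesL matrix := fun hmem => by
      rw [(pvOnesDict_get? matrix adj adj).2 ⟨hmem, rfl⟩] at hget
      cases hget
    rw [bfsLoop_notin _ _ _ _ _ _ _ hget]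
    obtain ⟨ihd, ihiff⟩ := ih hd (fun p hp => hq p (List.mem_cons_of_mem _ hp))
    refine ⟨ihd, fun p hp => (ihiff p hp).trans (or_congr_right ?_)⟩
    unfold pvReachQ
    constructor
    · rintro ⟨s, hs, h1, h2, h3⟩
      exact ⟨s, List.mem_cons_of_mem _ hs, h1, h2, h3⟩
    · rintro ⟨s, hs, h1, h2, h3⟩
      rcases List.mem_cons.1 hs with rfl | hs
      · exact absurd h1 hnot
      · exact ⟨s, hs, h1, h2, h3⟩
  | case3 v c adj rest ca hget hv ih =>
    intro hd hq
    obtain ⟨hones, rfl⟩ := (pvOnesDict_get? matrix adj ca).1 hget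
    have hcadj : pvCanon matrix ca := ((pvOnesL_mem matrix ca).1 hones).1
    have hnv : ¬ pvVisT v ca := by unfold pvVisT; rw [hv]; simp
    rw [bfsLoop_visit _ _ _ _ _ _ _ _ hget hv]
    have hd'' := pvDims_visSet matrix v ca.1 ca.2 hd
    have hga : getAdjacents rest ca.1 ca.2 (pvH matrix) (pvW matrix) =
        rest ++ pvNbrsIn matrix ca := by
      have := getAdjacents_eq matrix rest ca.1 ca.2 (by simpa using hcadj)
      simpa using this
    have hq'' : ∀ p ∈ getAdjacents rest ca.1 ca.2 (pvH matrix) (pvW matrix), pvCanon matrix p := by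
      rw [hga]; intro p hp
      rcases List.mem_append.1 hp with hp | hp
      · exact hq p (List.mem_cons_of_mem _ hp)
      · exact ((pvNbrsIn_mem matrix ca p).1 hp).2
    obtain ⟨ihd, ihiff⟩ := ih hd'' hq''
    refine ⟨ihd, fun p hp => ?_⟩
    rw [ihiff p hp, pvVisT_visSet matrix v ca p hd hcadj hp, hga]
    exact pvBfsStep_iff matrix v ca rest hones hnv hd p
  | case4 v c adj rest ca hget hv ih =>
    intro hd hq
    obtain ⟨hones, rfl⟩ := (pvOnesDict_get? matrix adj ca).1 hget
    have hvis : pvVisT v ca := hv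
    rw [bfsLoop_skipT _ _ _ _ _ _ _ _ hget hv]
    obtain ⟨ihd, ihiff⟩ := ih hd (fun p hp => hq p (List.mem_cons_of_mem _ hp))
    refine ⟨ihd, fun p hp => (ihiff p hp).trans (or_congr_right ?_)⟩
    unfold pvReachQ
    constructor
    · rintro ⟨s, hs, h1, h2, h3⟩
      exact ⟨s, List.mem_cons_of_mem _ hs, h1, h2, h3⟩
    · rintro ⟨s, hs, h1, h2, h3⟩
      rcases List.mem_cons.1 hs with rfl | hs
      · exact absurd hvis h2
      · exact ⟨s, hs, h1, h2, h3⟩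
  | case5 v c adj rest ca hget hv ih =>
    intro hd hq
    obtain ⟨hones, rfl⟩ := (pvOnesDict_get? matrix adj ca).1 hget
    have hcadj : pvCanon matrix ca := ((pvOnesL_mem matrix ca).1 hones).1
    have := pvVisGet_canon matrix v ca.1 ca.2 hd hcadj
    rw [this] at hv
    cases hv

-- per seed: the BFS marks exactly the connected component of the seed
lemma bfs_seed (matrix : List (List Int)) (v : List (List Bool)) (seed : Int × Int)
    (hd : pvDims matrix v) (hseed : seed ∈ pvOnesL matrix) (hnv : ¬ pvVisT v seed)
    (hcl : ∀ a b, a ∈ pvOnesL matrix → pvVisT v a → b ∈ pvOnesL matrix → b ∈ pvNbrs a → pvVisT v b) :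
    pvDims matrix (bfsLoop (pvOnesDict matrix (pvH matrix) (pvW matrix)) (pvH matrix) (pvW matrix)
      (pvVisSet v seed.1 seed.2) (pvNbrsIn matrix seed) 1).2 ∧
    ∀ p, pvCanon matrix p →
      (pvVisT (bfsLoop (pvOnesDict matrix (pvH matrix) (pvW matrix)) (pvH matrix) (pvW matrix)
        (pvVisSet v seed.1 seed.2) (pvNbrsIn matrix seed) 1).2 p ↔
        pvVisT v p ∨ pvReach matrix (fun _ => False) seed p) := by
  have hcseed : pvCanon matrix seed := ((pvOnesL_mem matrix seed).1 hseed).1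
  have hd1 := pvDims_visSet matrix v seed.1 seed.2 hd
  have hq1 : ∀ p ∈ pvNbrsIn matrix seed, pvCanon matrix p :=
    fun p hp => ((pvNbrsIn_mem matrix seed p).1 hp).2
  obtain ⟨ihd, ihiff⟩ := bfsLoop_main matrix (pvVisSet v seed.1 seed.2)
    (pvNbrsIn matrix seed) 1 hd1 hq1
  refine ⟨ihd, fun p hp => ?_⟩
  rw [ihiff p hp, pvVisT_visSet matrix v seed p hd hcseed hp]
  set v1 := pvVisSet v seed.1 seed.2 with hv1
  have hconv : ∀ {a b : Int × Int},
      pvReach matrix (pvVisT v1) a b →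
      Relation.ReflTransGen (fun x y => pvStep matrix (fun _ => False) x y ∧ ¬ pvVisT v1 y) a b :=
    fun h => Relation.ReflTransGen.mono
      (fun x y hy => ⟨⟨hy.1, not_false, hy.2.2⟩, hy.2.1⟩) h
  have hconv' : ∀ {a b : Int × Int},
      Relation.ReflTransGen (fun x y => pvStep matrix (fun _ => False) x y ∧ ¬ pvVisT v1 y) a b →
      pvReach matrix (pvVisT v1) a b :=
    fun h => Relation.ReflTransGen.mono
      (fun x y hy => ⟨hy.1.1, hy.2, hy.1.2.2⟩) h
  have hFromSeed : ∀ {t : Int × Int},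
      Relation.ReflTransGen (fun x y => pvStep matrix (fun _ => False) x y ∧ ¬ pvVisT v1 y) seed t →
      t = seed ∨ pvReachQ matrix v1 (pvNbrsIn matrix seed) t := by
    intro t hpath
    rcases Relation.ReflTransGen.cases_head hpath with rfl | ⟨n, hn, hnp⟩
    · exact Or.inl rfl
    · obtain ⟨⟨hnones, _, hnnbr⟩, hnnv⟩ := hn
      exact Or.inr ⟨n, (pvNbrsIn_mem matrix seed n).2
        ⟨hnnbr, ((pvOnesL_mem matrix n).1 hnones).1⟩, hnones, hnnv, hconv' hnp⟩
  constructor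
  · rintro ((hvis | rfl) | ⟨n, hnmem, hnones, hnnv, hpath⟩)
    · exact Or.inl hvis
    · exact Or.inr Relation.ReflTransGen.refl
    · refine Or.inr ?_
      obtain ⟨hnnbr, _⟩ := (pvNbrsIn_mem matrix seed n).1 hnmem
      exact Relation.ReflTransGen.head ⟨hnones, not_false, hnnbr⟩
        (pvReach_mono matrix _ _ (fun z hz => hz.elim) hpath)
  · rintro (hvis | hreach)
    · exact Or.inl (Or.inl hvis)
    · by_cases hpseed : p = seed
      · exact Or.inl (Or.inr hpseed)
      · by_cases hvp : pvVisT v p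
        · exact Or.inl (Or.inl hvp)
        · have hnPp : ¬ pvVisT v1 p := by
            rw [hv1, pvVisT_visSet matrix v seed p hd hcseed hp]
            rintro (hh | hh)
            · exact hvp hh
            · exact hpseed hh
          rcases pvLastExit _ (pvVisT v1) hreach hnPp with hpath' | ⟨t, hPt, hst, htp⟩
          · rcases hFromSeed hpath' with rfl | hh
            · exact absurd rfl hpseed
            · exact Or.inr hh
          · have htones : t = seed ∨ t ∈ pvOnesL matrix := by
              rcases pvReach_target matrix _ hst with rfl | hh
              · exact Or.inl rfl
              · exact Or.inr hh.1
            by_cases htseed : t = seed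
            · subst htseed
              rcases hFromSeed htp with rfl | hh
              · exact absurd rfl hpseed
              · exact Or.inr hh
            · rcases htones with rfl | htones
              · exact absurd rfl htseed
              · have hvt : pvVisT v t := by
                  rw [hv1, pvVisT_visSet matrix v seed t hd hcseed
                    (((pvOnesL_mem matrix t).1 htones).1)] at hPt
                  rcases hPt with hh | hh
                  · exact hh
                  · exact absurd hh htseed
                exact absurd (pvReach_back matrix (pvVisT v) hcl hseed hst hvt) hnv

-- ---- the frontier loop of B ----

-- unfolding equation for growLoop without the `attach` of well-founded compilation
lemma growLoop_unfold (o comp frontier : PySem.Set (Int × Int)) :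
    growLoop o comp frontier = if frontier = [] then comp
    else growLoop o (PySem.Set.union comp (PySem.Set.ofList ((frontier.flatMap pvNbrs).filter
        (fun n => PySem.Set.contains o n && !PySem.Set.contains comp n))))
      (PySem.Set.ofList ((frontier.flatMap pvNbrs).filter
        (fun n => PySem.Set.contains o n && !PySem.Set.contains comp n))) := by
  rw [growLoop]

lemma growLoop_main_aux (matrix : List (List Int)) : ∀ (N : Nat) (comp frontier : PySem.Set (Int × Int)),
    (((PySem.Set.ofList (pvOnesL matrix)).filter (fun c => !PySem.Set.contains comp c)).length ≤ N) →
    (∀ p ∈ frontier, p ∈ comp) → comp.Nodup →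
    (growLoop (PySem.Set.ofList (pvOnesL matrix)) comp frontier).Nodup ∧
    ∀ p, (p ∈ growLoop (PySem.Set.ofList (pvOnesL matrix)) comp frontier ↔
      p ∈ comp ∨ ∃ s ∈ frontier, pvReach matrix (fun z => z ∈ comp) s p) := by
  intro N
  induction N with
  | zero =>
    intro comp frontier hN hfs hnd
    by_cases hfr : frontier = []
    · rw [growLoop_unfold, if_pos hfr]
      refine ⟨hnd, fun p => ?_⟩
      subst hfr
      simp
    · -- the frontier is inside comp, so every 1-cell outside comp is still counted:
      -- show the loop body adds nothing and close as in the nonempty case below, or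
      -- derive the same conclusion: here the measure is 0, so no 1-cell is outside comp.
      have hnone : ∀ n, n ∈ pvOnesL matrix → n ∈ comp := by
        intro n hn
        by_contra hnc
        have hmem : n ∈ (PySem.Set.ofList (pvOnesL matrix)).filter
            (fun c => !PySem.Set.contains comp c) := by
          rw [List.mem_filter]
          refine ⟨(PySem.Set.mem_ofList _ _).2 hn, ?_⟩
          have hcf : PySem.Set.contains comp n = false := by
            by_contra hcc
            rw [Bool.not_eq_false] at hcc
            exact hnc ((PySem.Set.contains_iff _ _).1 hcc)
          simp only [hcf, Bool.not_false]
        have := List.length_pos_of_mem (by exact hmem)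
        omega
      -- with every 1-cell in comp, the next frontier is empty
      rw [growLoop_unfold, if_neg hfr]
      have hFnil : ((frontier.flatMap pvNbrs).filter
          (fun n => PySem.Set.contains (PySem.Set.ofList (pvOnesL matrix)) n &&
            !PySem.Set.contains comp n)) = [] := by
        rw [List.filter_eq_nil_iff]
        intro n _
        rw [Bool.and_eq_true, Bool.not_eq_true']
        rintro ⟨h1, h2⟩
        have hn : n ∈ pvOnesL matrix := by
          have := (PySem.Set.contains_iff _ _).1 h1
          rwa [PySem.Set.mem_ofList] at this
        rw [(PySem.Set.contains_iff _ _).2 (hnone n hn)] at h2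
        exact Bool.noConfusion h2
      rw [hFnil]
      have hnilset : PySem.Set.ofList ([] : List (Int × Int)) = [] := rfl
      rw [hnilset]
      have hun : PySem.Set.union comp ([] : PySem.Set (Int × Int)) = comp := rfl
      rw [hun, growLoop_unfold, if_pos rfl]
      refine ⟨hnd, fun p => ?_⟩
      constructor
      · exact Or.inl
      · rintro (hc | ⟨t, htfr, hpath⟩)
        · exact hc
        · rcases Relation.ReflTransGen.cases_head hpath with rfl | ⟨n, hn, _⟩
          · exact hfs t htfr
          · exact absurd (hnone n hn.1) hn.2.1
  | succ N ihN =>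
    intro comp frontier hN hfs hnd
    by_cases hfr : frontier = []
    · rw [growLoop_unfold, if_pos hfr]
      refine ⟨hnd, fun p => ?_⟩
      subst hfr
      simp
    · rw [growLoop_unfold, if_neg hfr]
      set F : PySem.Set (Int × Int) := PySem.Set.ofList ((frontier.flatMap pvNbrs).filter
        (fun n => PySem.Set.contains (PySem.Set.ofList (pvOnesL matrix)) n &&
          !PySem.Set.contains comp n)) with hFdef
      have hF : ∀ n, n ∈ F ↔ (∃ s ∈ frontier, n ∈ pvNbrs s) ∧ n ∈ pvOnesL matrix ∧ n ∉ comp := by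
        intro n
        rw [hFdef, PySem.Set.mem_ofList, List.mem_filter, List.mem_flatMap]
        constructor
        · rintro ⟨⟨a, ha, hna⟩, hcond⟩
          rw [Bool.and_eq_true, Bool.not_eq_true'] at hcond
          refine ⟨⟨a, ha, hna⟩, ?_, ?_⟩
          · have := (PySem.Set.contains_iff _ _).1 hcond.1
            rwa [PySem.Set.mem_ofList] at this
          · intro hc
            rw [(PySem.Set.contains_iff _ _).2 hc] at hcond
            exact Bool.noConfusion hcond.2
        · rintro ⟨⟨a, ha, hna⟩, hones, hnc⟩
          refine ⟨⟨a, ha, hna⟩, ?_⟩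
          rw [Bool.and_eq_true, Bool.not_eq_true']
          constructor
          · exact (PySem.Set.contains_iff _ _).2 (by rw [PySem.Set.mem_ofList]; exact hones)
          · by_contra hcc
            rw [Bool.not_eq_false] at hcc
            exact hnc ((PySem.Set.contains_iff _ _).1 hcc)
      have hmemU : ∀ z, z ∈ PySem.Set.union comp F ↔ z ∈ comp ∨ z ∈ F :=
        fun z => PySem.Set.mem_union _ _ _
      have hfs' : ∀ p ∈ F, p ∈ PySem.Set.union comp F :=
        fun p hp => (hmemU p).2 (Or.inr hp)
      have hnd' : (PySem.Set.union comp F).Nodup := PySem.Set.nodup_union _ _ hnd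
      by_cases hF0 : F = []
      · -- next frontier empty: one more unfolding finishes
        rw [hF0]
        have hun : PySem.Set.union comp ([] : PySem.Set (Int × Int)) = comp := rfl
        rw [hun, growLoop_unfold, if_pos rfl]
        refine ⟨hnd, fun p => ?_⟩
        constructor
        · exact Or.inl
        · rintro (hc | ⟨t, htfr, hpath⟩)
          · exact hc
          · rcases Relation.ReflTransGen.cases_head hpath with rfl | ⟨n, hn, _⟩
            · exact hfs t htfr
            · obtain ⟨hnones, hnnc, hnnbr⟩ := hn
              have : n ∈ F := (hF n).2 ⟨⟨t, htfr, hnnbr⟩, hnones, hnnc⟩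
              rw [hF0] at this
              cases this
      · have hN' : (((PySem.Set.ofList (pvOnesL matrix)).filter
            (fun c => !PySem.Set.contains (PySem.Set.union comp F) c)).length ≤ N) := by
          obtain ⟨n, hnF⟩ := List.exists_mem_of_ne_nil _ hF0
          obtain ⟨_, hnones, hnc⟩ := (hF n).1 hnF
          have hlt := pvFilterLen_lt (PySem.Set.ofList (pvOnesL matrix))
            (fun c => !PySem.Set.contains comp c)
            (fun c => !PySem.Set.contains (PySem.Set.union comp F) c)
            (by
              intro x _ hqx
              rw [Bool.not_eq_true'] at hqx ⊢
              by_contra hcc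
              rw [Bool.not_eq_false] at hcc
              have : x ∈ PySem.Set.union comp F := (hmemU x).2 (Or.inl ((PySem.Set.contains_iff _ _).1 hcc))
              rw [(PySem.Set.contains_iff _ _).2 this] at hqx
              exact Bool.noConfusion hqx)
            n ((PySem.Set.mem_ofList _ _).2 hnones)
            (by
              have hcf : PySem.Set.contains comp n = false := by
                by_contra hcc
                rw [Bool.not_eq_false] at hcc
                exact hnc ((PySem.Set.contains_iff _ _).1 hcc)
              simp only [hcf, Bool.not_false])
            (by
              have hmem : n ∈ PySem.Set.union comp F := (hmemU n).2 (Or.inr hnF)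
              simp only [(PySem.Set.contains_iff _ _).2 hmem, Bool.not_true])
          omega
        obtain ⟨ihnd, ihiff⟩ := ihN (PySem.Set.union comp F) F hN' hfs' hnd'
        refine ⟨ihnd, fun p => ?_⟩
        rw [ihiff p]
        constructor
        · rintro (hU | ⟨t, htF, hpath⟩)
          · rcases (hmemU p).1 hU with hc | hFm
            · exact Or.inl hc
            · obtain ⟨⟨a, ha, hna⟩, hones, hnc⟩ := (hF p).1 hFm
              exact Or.inr ⟨a, ha, Relation.ReflTransGen.single ⟨hones, hnc, hna⟩⟩
          · obtain ⟨⟨a, ha, hta⟩, htones, htnc⟩ := (hF t).1 htF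
            have hpath' : pvReach matrix (fun z => z ∈ comp) t p :=
              pvReach_mono matrix _ _ (fun z hz => (hmemU z).2 (Or.inl hz)) hpath
            exact Or.inr ⟨a, ha, Relation.ReflTransGen.head ⟨htones, htnc, hta⟩ hpath'⟩
        · rintro (hc | ⟨t, htfr, hpath⟩)
          · exact Or.inl ((hmemU p).2 (Or.inl hc))
          · by_cases hpU : p ∈ PySem.Set.union comp F
            · exact Or.inl hpU
            · have hpF : ¬ p ∈ F := fun hh => hpU ((hmemU p).2 (Or.inr hh))
              rcases pvLastExit _ (fun z => z ∈ F) hpath hpF with hpath' | ⟨u, huF, _, hup⟩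
              · rcases Relation.ReflTransGen.cases_head hpath' with rfl | ⟨n, hn, _⟩
                · exact absurd ((hmemU t).2 (Or.inl (hfs t htfr))) hpU
                · obtain ⟨⟨hnones, hnnc, hnnbr⟩, hnF⟩ := hn
                  exact absurd ((hF n).2 ⟨⟨t, htfr, hnnbr⟩, hnones, hnnc⟩) hnF
              · refine Or.inr ⟨u, huF, ?_⟩
                refine Relation.ReflTransGen.mono (fun x y hy => ?_) hup
                obtain ⟨⟨hyones, hync, hynbr⟩, hyF⟩ := hy
                refine ⟨hyones, fun hyu => ?_, hynbr⟩
                rcases (hmemU y).1 hyu with hh | hh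
                · exact hync hh
                · exact hyF hh

lemma growLoop_main (matrix : List (List Int)) (comp frontier : PySem.Set (Int × Int))
    (hfs : ∀ p ∈ frontier, p ∈ comp) (hnd : comp.Nodup) :
    (growLoop (PySem.Set.ofList (pvOnesL matrix)) comp frontier).Nodup ∧
    ∀ p, (p ∈ growLoop (PySem.Set.ofList (pvOnesL matrix)) comp frontier ↔
      p ∈ comp ∨ ∃ s ∈ frontier, pvReach matrix (fun z => z ∈ comp) s p) :=
  growLoop_main_aux matrix _ comp frontier (le_refl _) hfs hnd

lemma grow_seed (matrix : List (List Int)) (cell : Int × Int) (hc : cell ∈ pvOnesL matrix) :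
    (growLoop (PySem.Set.ofList (pvOnesL matrix)) (PySem.Set.ofList [cell]) (PySem.Set.ofList [cell])).Nodup ∧
    ∀ p, (p ∈ growLoop (PySem.Set.ofList (pvOnesL matrix)) (PySem.Set.ofList [cell]) (PySem.Set.ofList [cell]) ↔
      pvReach matrix (fun _ => False) cell p) := by
  have hsingle : PySem.Set.ofList [cell] = [cell] := rfl
  obtain ⟨hnd, hiff⟩ := growLoop_main matrix (PySem.Set.ofList [cell]) (PySem.Set.ofList [cell])
    (fun p hp => hp) (by rw [hsingle]; exact List.nodup_singleton cell)
  refine ⟨hnd, fun p => (hiff p).trans ?_⟩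
  rw [hsingle]
  have hconv' : ∀ {a b : Int × Int},
      Relation.ReflTransGen (fun x y => pvStep matrix (fun _ => False) x y ∧ ¬ (y = cell)) a b →
      pvReach matrix (fun z => z ∈ ([cell] : List (Int × Int))) a b :=
    fun h => Relation.ReflTransGen.mono (fun x y hy =>
      ⟨hy.1.1, fun hm => hy.2 (by simpa using hm), hy.1.2.2⟩) h
  have hFromCell : ∀ {p : Int × Int},
      Relation.ReflTransGen (fun x y => pvStep matrix (fun _ => False) x y ∧ ¬ (y = cell)) cell p →
      p ∈ ([cell] : List (Int × Int)) ∨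
        ∃ s ∈ ([cell] : List (Int × Int)), pvReach matrix (fun z => z ∈ ([cell] : List (Int × Int))) s p := by
    intro p hpath
    rcases Relation.ReflTransGen.cases_head hpath with rfl | ⟨n, hn, hnp⟩
    · exact Or.inl (List.mem_singleton_self cell)
    · exact Or.inr ⟨cell, List.mem_singleton_self cell,
        Relation.ReflTransGen.head ⟨hn.1.1, fun hm => hn.2 (by simpa using hm), hn.1.2.2⟩ (hconv' hnp)⟩
  constructor
  · rintro (hm | ⟨s, hs, hpath⟩)
    · rw [List.mem_singleton] at hm
      subst hm
      exact Relation.ReflTransGen.refl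
    · rw [List.mem_singleton] at hs
      subst hs
      exact pvReach_mono matrix _ _ (fun z hz => hz.elim) hpath
  · intro hreach
    by_cases hpc : p = cell
    · subst hpc
      exact Or.inl (List.mem_singleton_self p)
    · rcases pvLastExit _ (fun z => z = cell) hreach hpc with hpath' | ⟨t, rfl, _, htp⟩
      · rcases hFromCell hpath' with hh | hh
        · exact Or.inl hh
        · exact Or.inr hh
      · rcases hFromCell htp with hh | hh
        · exact Or.inl hh
        · exact Or.inr hh

-- ---- counting ----

lemma pvCountP_range_getD {α : Type} (f : α → Bool) (row : List α) (d : α) :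
    (List.range row.length).countP (fun k => f (row.getD k d)) = row.countP f := by
  induction row with
  | nil => simp
  | cons a tl ih =>
    rw [List.length_cons, List.range_succ_eq_map, List.countP_cons, List.countP_map]
    simp only [List.getD_cons_zero, List.getD_cons_succ]
    rw [List.countP_cons]
    have : (List.range tl.length).countP ((fun k => f ((a :: tl).getD k d)) ∘ (· + 1)) =
        (List.range tl.length).countP (fun k => f (tl.getD k d)) := by
      apply List.countP_congr
      intro k _
      simp [Function.comp, List.getD_cons_succ]
    rw [this, ih]

lemma pvLenFilterFlat {α β : Type} (L : List α) (f : α → List β) (P : β → Bool) :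
    ((L.flatMap f).filter P).length = (L.map (fun a => ((f a).filter P).length)).sum := by
  induction L with
  | nil => simp
  | cons a tl ih => simp [List.flatMap_cons, List.filter_append, ih]

lemma pvSum_map_range_getD {α : Type} (g : α → Nat) (v : List α) (d : α) :
    ((List.range v.length).map (fun k => g (v.getD k d))).sum = (v.map g).sum := by
  induction v with
  | nil => simp
  | cons a tl ih =>
    rw [List.length_cons, List.range_succ_eq_map]
    simp only [List.map_cons, List.map_map, List.getD_cons_zero, List.sum_cons]
    have : (List.range tl.length).map ((fun k => g ((a :: tl).getD k d)) ∘ (· + 1)) =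
        (List.range tl.length).map (fun k => g (tl.getD k d)) := by
      apply List.map_congr_left
      intro k _
      simp [Function.comp]
    rw [this, ih]

lemma pvTrueCount_eq (matrix : List (List Int)) (v : List (List Bool)) (hd : pvDims matrix v) :
    pvTrueCount v = ((pvGrid matrix).filter (fun p => pvVisGet v p.1 p.2 == some true)).length := by
  have hdims := hd
  obtain ⟨hlen, hrows⟩ := hd
  unfold pvTrueCount pvGrid
  rw [pvLenFilterFlat]
  have hpr : PySem.List.pyRange 0 (pvH matrix) 1 =
      (List.range (pvH matrix).toNat).map (fun k => ((k : Nat) : Int)) := by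
    rw [PySem.List.pyRange_one]
    simp
  rw [hpr, List.map_map]
  have hinner : ∀ k ∈ List.range (pvH matrix).toNat,
      ((fun a => (((PySem.List.pyRange 0 (pvW matrix) 1).map (fun y => (a, y))).filter
          (fun p => pvVisGet v p.1 p.2 == some true)).length) ∘ (fun k : Nat => ((k : Nat) : Int))) k =
      (fun k => (v.getD k []).count true) k := by
    intro k hk
    rw [List.mem_range] at hk
    simp only [Function.comp]
    rw [List.filter_map, List.length_map, ← List.countP_eq_length_filter]
    have hwr : PySem.List.pyRange 0 (pvW matrix) 1 =
        (List.range (pvW matrix).toNat).map (fun j => ((j : Nat) : Int)) := by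
      rw [PySem.List.pyRange_one]
      simp
    rw [hwr, List.countP_map]
    have hkv : k < v.length := by omega
    have hrl : (v.getD k []).length = (pvW matrix).toNat := by
      rw [List.getD_eq_getElem v [] hkv]
      exact hrows _ (List.getElem_mem hkv)
    have hcongr : ∀ j ∈ List.range (pvW matrix).toNat,
        ((((fun p : Int × Int => pvVisGet v p.1 p.2 == some true) ∘
          (fun y => (((k : Nat) : Int), y))) ∘ (fun j : Nat => ((j : Nat) : Int))) j = true) ↔
        ((fun j => (v.getD k []).getD j false == true) j = true) := by
      intro j hj
      rw [List.mem_range] at hj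
      simp only [Function.comp]
      have hcanon : pvCanon matrix ((((k : Nat) : Int)), (((j : Nat) : Int))) := by
        refine ⟨by positivity, ?_, by positivity, ?_⟩ <;>
          · simp only []
            omega
      have := pvVisGet_canon matrix v ((k : Nat) : Int) ((j : Nat) : Int) hdims hcanon
      rw [this]
      simp
    rw [List.countP_congr hcongr, ← hrl, pvCountP_range_getD (fun b => b == true) (v.getD k []) false]
    rfl
  rw [List.map_congr_left hinner, ← hlen, pvSum_map_range_getD (fun r => r.count true) v []]

lemma pvCountP_split {α : Type} (l : List α) (p q r : α → Bool)
    (h : ∀ a ∈ l, (r a = (p a || q a)) ∧ ¬(p a = true ∧ q a = true)) :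
    l.countP r = l.countP p + l.countP q := by
  induction l with
  | nil => simp
  | cons a tl ih =>
    obtain ⟨ha1, ha2⟩ := h a List.mem_cons_self
    have ih' := ih (fun x hx => h x (List.mem_cons_of_mem a hx))
    rw [List.countP_cons, List.countP_cons, List.countP_cons, ih', ha1]
    by_cases hpa : p a = true <;> by_cases hqa : q a = true
    · exact absurd ⟨hpa, hqa⟩ ha2
    · rw [Bool.not_eq_true] at hqa
      rw [hpa, hqa]
      simp
      try omega
    · rw [Bool.not_eq_true] at hpa
      rw [hpa, hqa]
      simp
      try omega
    · rw [Bool.not_eq_true] at hpa hqa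
      rw [hpa, hqa]
      simp
      try omega

lemma pvCountP_mem {α : Type} (l C : List α) (P : α → Bool) (hl : l.Nodup) (hC : C.Nodup)
    (hsub : ∀ c ∈ C, c ∈ l) (hP : ∀ a, P a = true ↔ a ∈ C) : l.countP P = C.length := by
  rw [List.countP_eq_length_filter]
  have hperm : (l.filter P).Perm C := by
    rw [List.perm_ext_iff_of_nodup (hl.filter _) hC]
    intro a
    rw [List.mem_filter]
    constructor
    · rintro ⟨_, hm⟩
      exact (hP a).1 hm
    · intro hm
      exact ⟨hsub a hm, (hP a).2 hm⟩
  exact hperm.length_eq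

lemma pvCount_bridge (matrix : List (List Int)) (v v' : List (List Bool)) (C : List (Int × Int))
    (hd : pvDims matrix v) (hd' : pvDims matrix v') (hC : C.Nodup)
    (hsub : ∀ c ∈ C, c ∈ pvOnesL matrix)
    (hdisj : ∀ c ∈ C, ¬ pvVisT v c)
    (hiff : ∀ p, pvCanon matrix p → (pvVisT v' p ↔ pvVisT v p ∨ p ∈ C)) :
    pvTrueCount v' = pvTrueCount v + C.length := by
  rw [pvTrueCount_eq matrix v hd, pvTrueCount_eq matrix v' hd']
  rw [← List.countP_eq_length_filter, ← List.countP_eq_length_filter]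
  rw [pvCountP_split (pvGrid matrix) (fun p => pvVisGet v p.1 p.2 == some true)
    (fun a => decide (a ∈ C)) (fun p => pvVisGet v' p.1 p.2 == some true) ?_]
  · rw [pvCountP_mem (pvGrid matrix) C _ (pvGrid_nodup matrix) hC
      (fun c hc => (pvGrid_mem matrix c).2 (((pvOnesL_mem matrix c).1 (hsub c hc)).1))
      (fun a => decide_eq_true_iff)]
  · intro a ha
    have hcanon := (pvGrid_mem matrix a).1 ha
    constructor
    · rw [Bool.eq_iff_iff, Bool.or_eq_true, beq_iff_eq, beq_iff_eq, decide_eq_true_iff]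
      exact hiff a hcanon
    · rintro ⟨h1, h2⟩
      rw [beq_iff_eq] at h1
      rw [decide_eq_true_iff] at h2
      exact hdisj a h2 h1

-- ---- the outer loops ----

def pvInv (matrix : List (List Int)) (stA : List Int × List (List Bool))
    (stB : List Int × PySem.Set (Int × Int)) : Prop :=
  stA.1 = stB.1 ∧ pvDims matrix stA.2 ∧ stB.2.Nodup ∧
  (∀ p, pvCanon matrix p → (pvVisT stA.2 p ↔ p ∈ stB.2)) ∧
  (∀ p ∈ stB.2, p ∈ pvOnesL matrix) ∧
  (∀ a b, a ∈ stB.2 → b ∈ pvOnesL matrix → b ∈ pvNbrs a → b ∈ stB.2)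

def pvStepA (matrix : List (List Int)) (st : List Int × List (List Bool)) (p : Int × Int) :
    List Int × List (List Bool) :=
  if pvVisGet st.2 p.1 p.2 == some true then st
  else
    let visited1 := pvVisSet st.2 p.1 p.2
    let adjacents := getAdjacents [] p.1 p.2 (pvH matrix) (pvW matrix)
    let out := bfsLoop (pvOnesDict matrix (pvH matrix) (pvW matrix)) (pvH matrix) (pvW matrix) visited1 adjacents 1
    (if out.1 ≥ 1 then st.1 ++ [out.1] else st.1, out.2)

def pvStepB (matrix : List (List Int)) (st : List Int × PySem.Set (Int × Int)) (cell : Int × Int) :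
    List Int × PySem.Set (Int × Int) :=
  if PySem.Set.contains st.2 cell then st
  else
    let comp := growLoop (PySem.Set.ofList (pvOnesL matrix)) (PySem.Set.ofList [cell]) (PySem.Set.ofList [cell])
    (st.1 ++ [PySem.Set.len comp], PySem.Set.union st.2 comp)

lemma riverSizes_eq_foldA (matrix : List (List Int)) :
    riverSizes matrix = ((pvOnesL matrix).foldl (pvStepA matrix)
      ([], (PySem.List.pyRange 0 (pvH matrix) 1).map
        (fun _ => (PySem.List.pyRange 0 (pvW matrix) 1).map (fun _ => false)))).1 := by
  have key : ∀ (st0 : List Int × List (List Bool)),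
      (PySem.List.pyRange 0 (pvH matrix) 1).foldl (fun st x =>
        (PySem.List.pyRange 0 (pvW matrix) 1).foldl (fun st y =>
          if pvCell matrix x y == 1 then
            if pvVisGet st.2 x y == some true then st
            else
              let visited1 := pvVisSet st.2 x y
              let adjacents := getAdjacents [] x y (pvH matrix) (pvW matrix)
              let out := bfsLoop (pvOnesDict matrix (pvH matrix) (pvW matrix)) (pvH matrix)
                (pvW matrix) visited1 adjacents 1
              (if out.1 ≥ 1 then st.1 ++ [out.1] else st.1, out.2)
          else st) st) st0
      = (pvOnesL matrix).foldl (pvStepA matrix) st0 := by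
    intro st0
    rw [pvOnesL_eq, ← PySem.List.foldl_if_eq_foldl_filter]
    unfold pvGrid
    rw [List.foldl_flatMap]
    apply PySem.List.foldl_congr_mem
    intro st x _
    rw [List.foldl_map]
    rfl
  unfold riverSizes
  exact congrArg Prod.fst (key _)

lemma riverSizes_alt_eq_foldB (matrix : List (List Int)) :
    riverSizes_alt matrix = ((pvOnesL matrix).foldl (pvStepB matrix) ([], PySem.Set.empty)).1 := rfl

lemma pvStep_inv (matrix : List (List Int)) (stA : List Int × List (List Bool))
    (stB : List Int × PySem.Set (Int × Int)) (cell : Int × Int)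
    (hinv : pvInv matrix stA stB) (hc : cell ∈ pvOnesL matrix) :
    pvInv matrix (pvStepA matrix stA cell) (pvStepB matrix stB cell) := by
  obtain ⟨h1, h2, h3, h4, h5, h6⟩ := hinv
  have hccell : pvCanon matrix cell := ((pvOnesL_mem matrix cell).1 hc).1
  by_cases hvis : pvVisT stA.2 cell
  · -- both sides skip
    have hA : (pvVisGet stA.2 cell.1 cell.2 == some true) = true := by
      rw [beq_iff_eq]; exact hvis
    have hB : PySem.Set.contains stB.2 cell = true :=
      (PySem.Set.contains_iff _ _).2 ((h4 cell hccell).1 hvis)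
    unfold pvStepA pvStepB
    rw [if_pos hA, if_pos hB]
    exact ⟨h1, h2, h3, h4, h5, h6⟩
  · have hA : ¬ ((pvVisGet stA.2 cell.1 cell.2 == some true) = true) := by
      rw [beq_iff_eq]; exact hvis
    have hB : ¬ (PySem.Set.contains stB.2 cell = true) := by
      rw [PySem.Set.contains_iff]
      exact fun hm => hvis ((h4 cell hccell).2 hm)
    unfold pvStepA pvStepB
    rw [if_neg hA, if_neg hB]
    simp only []
    -- closure hypothesis for the visited set
    have hcl : ∀ a b, a ∈ pvOnesL matrix → pvVisT stA.2 a → b ∈ pvOnesL matrix →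
        b ∈ pvNbrs a → pvVisT stA.2 b := by
      intro a b haones hva hbones hnbr
      have hca : pvCanon matrix a := ((pvOnesL_mem matrix a).1 haones).1
      have hcb : pvCanon matrix b := ((pvOnesL_mem matrix b).1 hbones).1
      exact (h4 b hcb).2 (h6 a b ((h4 a hca).1 hva) hbones hnbr)
    have hga : getAdjacents [] cell.1 cell.2 (pvH matrix) (pvW matrix) = pvNbrsIn matrix cell := by
      have := getAdjacents_eq matrix [] cell.1 cell.2 (by simpa using hccell)
      simpa using this
    obtain ⟨hdout, hiffA⟩ := bfs_seed matrix stA.2 cell h2 hc hvis hcl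
    obtain ⟨hndC, hmemC⟩ := grow_seed matrix cell hc
    set comp := growLoop (PySem.Set.ofList (pvOnesL matrix)) (PySem.Set.ofList [cell])
      (PySem.Set.ofList [cell]) with hcompdef
    set out := bfsLoop (pvOnesDict matrix (pvH matrix) (pvW matrix)) (pvH matrix) (pvW matrix)
      (pvVisSet stA.2 cell.1 cell.2) (pvNbrsIn matrix cell) 1 with houtdef
    rw [hga]
    -- component is inside the 1-cells
    have hsubC : ∀ p ∈ comp, p ∈ pvOnesL matrix := by
      intro p hp
      rcases pvReach_target matrix _ ((hmemC p).1 hp) with rfl | hh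
      · exact hc
      · exact hh.1
    -- component is disjoint from the already-visited set
    have hdisjC : ∀ p ∈ comp, ¬ pvVisT stA.2 p := by
      intro p hp hvp
      exact hvis (pvReach_back matrix (pvVisT stA.2) hcl hc ((hmemC p).1 hp) hvp)
    -- the two sizes agree
    obtain ⟨k, hk1, hk2⟩ := bfsLoop_size (pvOnesDict matrix (pvH matrix) (pvW matrix))
      (pvH matrix) (pvW matrix) (pvVisSet stA.2 cell.1 cell.2) (pvNbrsIn matrix cell) 1
    rw [← houtdef] at hk1 hk2
    have hvfalse : pvVisGet stA.2 cell.1 cell.2 = some false :=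
      pvVisGet_false matrix stA.2 cell h2 hccell hvis
    have hv1 : pvTrueCount (pvVisSet stA.2 cell.1 cell.2) = pvTrueCount stA.2 + 1 :=
      pvTrueCount_visSet _ _ _ hvfalse
    have hbridge : pvTrueCount out.2 = pvTrueCount stA.2 + comp.length := by
      apply pvCount_bridge matrix stA.2 out.2 comp h2 hdout hndC hsubC hdisjC
      intro p hp
      rw [hiffA p hp, hmemC p]
    have hsize : out.1 = (comp.length : Int) := by
      rw [hk1]
      have : comp.length = 1 + k := by omega
      rw [this]
      push_cast
      ring
    have hlenC : PySem.Set.len comp = (comp.length : Int) := rfl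
    have hge : out.1 ≥ 1 := by
      rw [hsize]
      have : 0 < comp.length := List.length_pos_of_mem ((hmemC cell).2 Relation.ReflTransGen.refl)
      omega
    rw [if_pos hge]
    refine ⟨?_, hdout, PySem.Set.nodup_union _ _ h3, ?_, ?_, ?_⟩
    · rw [h1, hsize, hlenC]
    · intro p hp
      rw [hiffA p hp, PySem.Set.mem_union, h4 p hp, hmemC p]
    · intro p hp
      rcases (PySem.Set.mem_union _ _ _).1 hp with hh | hh
      · exact h5 p hh
      · exact hsubC p hh
    · intro a b ha hbones hnbr
      rcases (PySem.Set.mem_union _ _ _).1 ha with hh | hh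
      · exact (PySem.Set.mem_union _ _ _).2 (Or.inl (h6 a b hh hbones hnbr))
      · refine (PySem.Set.mem_union _ _ _).2 (Or.inr ?_)
        rw [hmemC b]
        exact Relation.ReflTransGen.tail ((hmemC a).1 hh) ⟨hbones, not_false, hnbr⟩

lemma pvFold_inv (matrix : List (List Int)) (l : List (Int × Int))
    (hl : ∀ p ∈ l, p ∈ pvOnesL matrix)
    (stA : List Int × List (List Bool)) (stB : List Int × PySem.Set (Int × Int))
    (hinv : pvInv matrix stA stB) :
    pvInv matrix (l.foldl (pvStepA matrix) stA) (l.foldl (pvStepB matrix) stB) := by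
  induction l generalizing stA stB with
  | nil => exact hinv
  | cons a tl ih =>
    rw [List.foldl_cons, List.foldl_cons]
    exact ih (fun p hp => hl p (List.mem_cons_of_mem a hp)) _ _
      (pvStep_inv matrix stA stB a hinv (hl a List.mem_cons_self))

lemma pvInv_init (matrix : List (List Int)) :
    pvInv matrix ([], (PySem.List.pyRange 0 (pvH matrix) 1).map
      (fun _ => (PySem.List.pyRange 0 (pvW matrix) 1).map (fun _ => false)))
      ([], PySem.Set.empty) := by
  have hdims : pvDims matrix ((PySem.List.pyRange 0 (pvH matrix) 1).map
      (fun _ => (PySem.List.pyRange 0 (pvW matrix) 1).map (fun _ => false))) := by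
    constructor
    · rw [List.length_map, PySem.List.length_pyRange_one]
      simp
    · intro r hr
      obtain ⟨x, _, rfl⟩ := List.mem_map.1 hr
      rw [List.length_map, PySem.List.length_pyRange_one]
      simp
  refine ⟨rfl, hdims, List.nodup_nil, ?_, by simp [PySem.Set.empty], by simp [PySem.Set.empty]⟩
  intro p hp
  simp only [PySem.Set.empty, List.not_mem_nil, iff_false]
  intro hvis
  unfold pvVisT at hvis
  rw [pvVisGet_canon matrix _ p.1 p.2 hdims hp] at hvis
  have h1 : ∀ (j : Nat) (L : List Int),
      ((L.map (fun _ => false)).getD j false) = false := by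
    intro j L
    rw [List.getD_eq_getElem?_getD, List.getElem?_map]
    cases L[j]? <;> simp
  have h2 : ∀ (k : Nat), (((PySem.List.pyRange 0 (pvH matrix) 1).map
      (fun _ => (PySem.List.pyRange 0 (pvW matrix) 1).map (fun _ => false))).getD k []).getD
        p.2.toNat false = false := by
    intro k
    have houter : (((PySem.List.pyRange 0 (pvH matrix) 1).map
        (fun _ => (PySem.List.pyRange 0 (pvW matrix) 1).map (fun _ => false))).getD k []) =
        (((PySem.List.pyRange 0 (pvH matrix) 1)[k]?).map
          (fun _ => (PySem.List.pyRange 0 (pvW matrix) 1).map (fun _ => false))).getD [] := by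
      rw [List.getD_eq_getElem?_getD, List.getElem?_map]
    rw [houter]
    rcases hg : (PySem.List.pyRange 0 (pvH matrix) 1)[k]? with _ | x
    · simp
    · simp only [Option.map_some, Option.getD_some]
      exact h1 _ _
  rw [h2] at hvis
  exact Bool.noConfusion (Option.some.inj hvis)


theorem riverSizes_eq (matrix : List (List Int)) : riverSizes matrix = riverSizes_alt matrix := by
  rw [riverSizes_eq_foldA, riverSizes_alt_eq_foldB]
  exact (pvFold_inv matrix (pvOnesL matrix) (fun p hp => hp) _ _ (pvInv_init matrix)).1

-- ===== VERDICT (by name: the statement is the Claim_ definition above) =====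
theorem riverSizes_spec : Claim_equal_riverSizes := by
  intro matrix _ _
  unfold Spec_riverSizes
  exact riverSizes_eq matrix
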